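-- pv_equiv track=rewrite | github.com/JamesM92/LXMF_Bot | src/plugins/help.py | build_category_page
-- ===== SOURCE A (Python) =====
-- import math
--
-- PAGE_SIZE = 5
--
-- def build_category_page(commands, category):
--
--     filtered = [
--         (name, data)
--         for name, data in commands.items()
--         if data["category"].lower() == category.lower()
--     ]
--
--     if not filtered:
--         return f"No commands in '{category}'."
--
--     total_pages = math.ceil(len(filtered) / PAGE_SIZE)
--
--     pages = []
--
--     for page in range(total_pages):
--
--         start = page * PAGE_SIZE
--         end = start + PAGE_SIZE
--
--         chunk = filtered[start:end]
--
--         lines = [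
--             f"📂 {category}",
--             f"Page {page+1}/{total_pages}\n"
--         ]
--
--         for name, data in chunk:
--             admin_flag = " (admin)" if data["admin"] else ""
--             lines.append(
--                 f"• {name}{admin_flag} - {data['desc']}"
--             )
--
--         pages.append("\n".join(lines))
--
--     return pages[0]
-- ===== SOURCE B (Python) =====
-- def build_category_page(commands, category):
--     cat = category.lower()
--     n = 0
--     body = ""
--     for name, data in commands.items():
--         if data["category"].lower() == cat:
--             n += 1
--             if n <= 5:
--                 flag = " (admin)" if data["admin"] else ""
--                 body += f"\n\u2022 {name}{flag} - {data['desc']}"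
--     if n == 0:
--         return f"No commands in '{category}'."
--     total = (n + 4) // 5
--     return f"\U0001F4C2 {category}\nPage 1/{total}\n{body}"
-- ===== Notes on version B (the rewrite author's own statement) =====
-- stated objective: simpler
-- what changed: A builds every page of the help listing in an outer loop over range(ceil(n/5)) with slicing and a lines list, then returns only page 0; B makes one pass over the commands, counting all matches and string-appending at most the first five bullet lines, then prepends the header - no page loop, no slicing, no intermediate lists.
import Mathlib
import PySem

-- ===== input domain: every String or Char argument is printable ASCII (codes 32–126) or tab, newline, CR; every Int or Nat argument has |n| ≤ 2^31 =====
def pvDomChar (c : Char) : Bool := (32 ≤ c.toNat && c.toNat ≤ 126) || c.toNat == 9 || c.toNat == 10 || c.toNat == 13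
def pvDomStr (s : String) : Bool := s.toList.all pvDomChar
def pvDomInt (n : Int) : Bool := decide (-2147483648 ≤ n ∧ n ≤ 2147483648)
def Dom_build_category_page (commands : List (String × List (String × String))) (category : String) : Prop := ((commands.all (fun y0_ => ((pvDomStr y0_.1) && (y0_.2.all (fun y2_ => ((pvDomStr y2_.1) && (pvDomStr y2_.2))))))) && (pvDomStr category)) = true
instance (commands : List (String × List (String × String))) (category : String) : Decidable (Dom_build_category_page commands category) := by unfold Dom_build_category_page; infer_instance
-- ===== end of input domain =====

-- B removes A's outer loop over all pages (A builds every page and returns page 0):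
-- one pass over the commands counts the matches and formats at most the first 5 bullet
-- lines, then the header is prepended; objective: simpler (no page list, no slicing).

-- ===== PORT A =====
def build_category_page (commands : List (String × List (String × String))) (category : String) : String :=
  let filtered := commands.filter (fun p =>
    PySem.Str.lower (PySem.Dict.getD (PySem.Dict.mk p.2) "category" "") == PySem.Str.lower category)
  if filtered.isEmpty then
    "No commands in '" ++ category ++ "'."
  else
    let totalPages : Nat := (filtered.length + 4) / 5   -- math.ceil(len/5): exact since len ≥ 0
    let pages := (List.range totalPages).foldl (fun acc (page : Nat) =>
      let start := page * 5
      let stop := start + 5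
      let chunk := PySem.List.slice filtered (some (start : Int)) (some (stop : Int))
      let lines := ["📂 " ++ category,
                    "Page " ++ PySem.Int.toStr ((page : Int) + 1) ++ "/" ++ PySem.Int.toStr (totalPages : Int) ++ "\n"]
      let lines := chunk.foldl (fun ls p =>
        ls ++ ["• " ++ p.1
               ++ (if (PySem.Dict.getD (PySem.Dict.mk p.2) "admin" "") ≠ "" then " (admin)" else "")
               ++ " - " ++ PySem.Dict.getD (PySem.Dict.mk p.2) "desc" ""]) lines
      acc ++ [PySem.Str.join "\n" lines]) ([] : List String)
    pages.headD ""   -- pages[0]; pages is nonempty here since totalPages ≥ 1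

-- ===== PORT B =====
def build_category_page_alt (commands : List (String × List (String × String))) (category : String) : String :=
  let cat := PySem.Str.lower category
  let st := commands.foldl (fun (st : Nat × String) p =>
    if PySem.Str.lower (PySem.Dict.getD (PySem.Dict.mk p.2) "category" "") == cat then
      let n := st.1 + 1
      (n, if n ≤ 5 then
            st.2 ++ ("\n" ++ ("• " ++ p.1
              ++ (if (PySem.Dict.getD (PySem.Dict.mk p.2) "admin" "") ≠ "" then " (admin)" else "")
              ++ " - " ++ PySem.Dict.getD (PySem.Dict.mk p.2) "desc" ""))
          else st.2)
    else st) ((0 : Nat), "")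
  if st.1 = 0 then
    "No commands in '" ++ category ++ "'."
  else
    "📂 " ++ category ++ "\nPage 1/" ++ PySem.Int.toStr (((st.1 + 4) / 5 : Nat) : Int) ++ "\n" ++ st.2

-- ===== PRECONDITION & SPEC =====
-- Pre_ excludes inputs on which A raises KeyError: some entry's data dict lacks the key
-- "category", or an entry whose category matches lacks "admin" or "desc".
def Pre_build_category_page (commands : List (String × List (String × String))) (category : String) : Prop :=
  ∀ p ∈ commands,
    (PySem.Dict.get? (PySem.Dict.mk p.2) "category").isSome = true ∧
    (PySem.Str.lower (PySem.Dict.getD (PySem.Dict.mk p.2) "category" "") = PySem.Str.lower category →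
      (PySem.Dict.get? (PySem.Dict.mk p.2) "admin").isSome = true ∧
      (PySem.Dict.get? (PySem.Dict.mk p.2) "desc").isSome = true)
instance (commands : List (String × List (String × String))) (category : String) : Decidable (Pre_build_category_page commands category) := by unfold Pre_build_category_page; infer_instance

def pvWitness_build_category_page : (List (String × List (String × String))) × String :=
  ([("ping", [("category", "General"), ("admin", ""), ("desc", "Pong")])], "general")

def Spec_build_category_page (commands : List (String × List (String × String))) (category : String) (out : String) : Prop := out = build_category_page_alt commands category
instance (commands : List (String × List (String × String))) (category : String) (out : String) : Decidable (Spec_build_category_page commands category out) := by unfold Spec_build_category_page; infer_instance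

-- ===== CLAIM (what is proved, stated in full; the proofs are below) =====
def Claim_equal_build_category_page : Prop := ∀ (commands : List (String × List (String × String))) (category : String), Dom_build_category_page commands category → Pre_build_category_page commands category → Spec_build_category_page commands category (build_category_page commands category)

-- ===== LEMMAS AND PROOFS =====

-- the match predicate and the bullet-line formatter both sources share
def bcpMatch (category : String) (p : String × List (String × String)) : Bool :=
  PySem.Str.lower (PySem.Dict.getD (PySem.Dict.mk p.2) "category" "") == PySem.Str.lower category

def bcpLine (p : String × List (String × String)) : String :=
  "• " ++ p.1
  ++ (if (PySem.Dict.getD (PySem.Dict.mk p.2) "admin" "") ≠ "" then " (admin)" else "")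
  ++ " - " ++ PySem.Dict.getD (PySem.Dict.mk p.2) "desc" ""

-- shifting the accumulator out of the bullet-appending fold
theorem bcp_foldl_shift {α : Type} (g : α → String) (ls : List α) (a b : String) :
    ls.foldl (fun acc s => acc ++ g s) (a ++ b) = a ++ ls.foldl (fun acc s => acc ++ g s) b := by
  induction ls generalizing b with
  | nil => rfl
  | cons x xs ih =>
      simp only [List.foldl_cons]
      rw [String.append_assoc, ih]

-- "\n".join(a :: ls) as a fold appending "\n" ++ line
theorem bcp_join_eq_foldl (ls : List String) (a : String) :
    PySem.Str.join "\n" (a :: ls) = ls.foldl (fun acc s => acc ++ ("\n" ++ s)) a := by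
  induction ls generalizing a with
  | nil =>
      simp [PySem.Str.join, PySem.Chars.join_singleton]
  | cons x xs ih =>
      have h : PySem.Str.join "\n" (a :: x :: xs) = a ++ "\n" ++ PySem.Str.join "\n" (x :: xs) := by
        simp only [PySem.Str.join, List.map_cons, PySem.Chars.join_cons_cons, String.ofList_append]
        simp [String.ofList_toList]
      rw [h, ih]
      simp only [List.foldl_cons]
      rw [bcp_foldl_shift (fun s => "\n" ++ s) xs a ("\n" ++ x),
          bcp_foldl_shift (fun s => "\n" ++ s) xs "\n" x,
          String.append_assoc]

-- pulling the initial accumulator out of a bullet-appending fold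
theorem bcp_foldl_shift0 {α : Type} (g : α → String) (ls : List α) (a : String) :
    ls.foldl (fun acc s => acc ++ g s) a = a ++ ls.foldl (fun acc s => acc ++ g s) "" := by
  have h := bcp_foldl_shift g ls a ""
  simpa using h

-- A's two header lines joined = B's single header string
theorem bcp_header (c t : String) :
    "📂 " ++ c ++ ("\n" ++ ("Page " ++ "1" ++ "/" ++ t ++ "\n"))
      = "📂 " ++ c ++ "\nPage 1/" ++ t ++ "\n" := by
  simp only [String.append_assoc]
  congr 2

-- B's single pass: counts all matches, formats the first five
theorem bcp_foldB (category : String) (l : List (String × List (String × String))) (n : Nat) (b : String) :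
    l.foldl (fun (st : Nat × String) p =>
      if bcpMatch category p then
        (st.1 + 1, if st.1 + 1 ≤ 5 then st.2 ++ ("\n" ++ bcpLine p) else st.2)
      else st) (n, b)
    = (n + (l.filter (bcpMatch category)).length,
       ((l.filter (bcpMatch category)).take (5 - n)).foldl (fun acc p => acc ++ ("\n" ++ bcpLine p)) b) := by
  induction l generalizing n b with
  | nil => simp
  | cons p ps ih =>
      by_cases hm : bcpMatch category p
      · by_cases h5 : n + 1 ≤ 5
        · simp only [List.foldl_cons, hm, if_true, h5, if_true, List.filter_cons_of_pos hm]
          rw [ih]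
          have : 5 - n = (5 - (n + 1)) + 1 := by omega
          rw [this, List.take_succ_cons]
          simp [Nat.add_comm, Nat.add_left_comm]
        · have h0 : 5 - n = 0 := by omega
          have h1 : 5 - (n + 1) = 0 := by omega
          simp only [List.foldl_cons, hm, if_true, h5, if_false, List.filter_cons_of_pos hm]
          rw [ih, h0, h1]
          simp [Nat.add_comm, Nat.add_left_comm]
      · simp only [List.foldl_cons, hm, List.filter_cons_of_neg hm]
        exact ih n b

-- ===== VERDICT (by name: the statement is the Claim_ definition above) =====
theorem build_category_page_spec : Claim_equal_build_category_page := by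
  intro commands category _ _
  unfold Spec_build_category_page build_category_page build_category_page_alt
  simp only [← bcpMatch.eq_def, ← bcpLine.eq_def, bcp_foldB]
  rw [show List.filter (bcpMatch category) commands
        = List.filter (fun p => bcpMatch category p) commands from rfl]
  by_cases hE : (List.filter (fun p => bcpMatch category p) commands).isEmpty = true
  · have hlen : (List.filter (fun p => bcpMatch category p) commands).length = 0 := by
      simp only [List.isEmpty_iff] at hE
      simp [hE]
    rw [if_pos hE, if_pos (by omega)]
  · have hlen : 0 < (List.filter (fun p => bcpMatch category p) commands).length := by
      simp only [List.isEmpty_iff] at hE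
      exact List.length_pos_iff.mpr hE
    rw [if_neg hE, if_neg (by omega)]
    obtain ⟨k, hk⟩ : ∃ k, ((List.filter (fun p => bcpMatch category p) commands).length + 4) / 5 = k + 1 :=
      ⟨((List.filter (fun p => bcpMatch category p) commands).length + 4) / 5 - 1, by omega⟩
    simp only [Nat.zero_add, hk]
    rw [PySem.List.foldl_append_singleton_eq_map, List.range_succ_eq_map]
    simp only [List.map_cons, List.nil_append, List.headD_cons]
    simp only [Nat.zero_mul, Nat.zero_add]
    rw [PySem.List.slice_natCast]
    simp only [List.drop_zero, Nat.sub_zero]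
    rw [PySem.List.foldl_append_singleton_eq_map bcpLine]
    simp only [List.cons_append, List.nil_append]
    rw [bcp_join_eq_foldl]
    simp only [List.foldl_cons]
    rw [List.foldl_map]
    rw [show PySem.Int.toStr (((0 : Nat) : Int) + 1) = "1" from by decide]
    rw [bcp_header]
    conv_lhs => rw [bcp_foldl_shift0]
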